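-- pv_equiv track=rewrite | github.com/Fr75s/kdenlive-title-gen | helpers.py | layout_to_sequences
-- ===== SOURCE A (Python) =====
-- def layout_to_sequences(layout: list[dict], title_last: bool = False) -> list[list[dict]]:
-- 	sections = [[]]
-- 	section = 0
--
-- 	# Iterate through clips
-- 	for clip in layout:
-- 		# Create new section if section clip, otherwise add to existing section
-- 		if clip["ref"][:7] == "section":
-- 			section += 1
-- 			sections.append([clip])
-- 		else:
-- 			sections[section].append(clip)
--
-- 	if (title_last):
-- 		# Move title section to end
-- 		sections.append(sections[0])
-- 		del sections[0]
--
-- 	return sections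
-- ===== SOURCE B (Python) =====
-- def layout_to_sequences(layout: list[dict], title_last: bool = False) -> list[list[dict]]:
-- 	# Find section boundaries first, then build sections by slicing.
-- 	marks = [i for i, clip in enumerate(layout) if clip["ref"][:7] == "section"]
-- 	bounds = [0] + marks + [len(layout)]
-- 	sections = [layout[a:b] for a, b in zip(bounds, bounds[1:])]
-- 	if title_last:
-- 		sections = sections[1:] + sections[:1]
-- 	return sections
-- ===== Notes on version B (the rewrite author's own statement) =====
-- stated objective: alternative
-- what changed: Replaces the append-per-clip accumulator loop with a two-phase pass: first collect the marker indices, then build every section as a slice between consecutive boundaries; the rotation becomes slice concatenation.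
import Mathlib
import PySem

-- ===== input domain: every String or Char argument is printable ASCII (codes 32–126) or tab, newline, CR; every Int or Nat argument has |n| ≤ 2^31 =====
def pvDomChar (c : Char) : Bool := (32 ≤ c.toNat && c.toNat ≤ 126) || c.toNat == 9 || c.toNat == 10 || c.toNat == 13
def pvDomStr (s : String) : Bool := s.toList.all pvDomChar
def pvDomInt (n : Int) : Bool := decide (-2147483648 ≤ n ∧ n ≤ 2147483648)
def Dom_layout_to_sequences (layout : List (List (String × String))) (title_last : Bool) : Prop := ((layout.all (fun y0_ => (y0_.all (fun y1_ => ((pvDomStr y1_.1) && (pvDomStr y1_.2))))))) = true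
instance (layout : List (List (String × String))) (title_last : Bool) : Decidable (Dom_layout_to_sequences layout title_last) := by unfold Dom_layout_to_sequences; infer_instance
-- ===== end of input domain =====

-- B replaces A's append-per-clip accumulator loop by computing the marker indices first and building
-- each section as a slice between consecutive boundaries (alternative decomposition, same cost).


-- ===== PORT A =====
-- clip["ref"] : first-match lookup in the association list (Python dict); Pre_ guarantees the key exists,
-- so the `getD ""` default is never taken on admitted inputs.  clip["ref"][:7] == "section":
def refSec7 (clip : List (String × String)) : Bool :=
  PySem.Str.slice (((clip.find? (fun kv => kv.1 == "ref")).map (·.2)).getD "") (some 0) (some 7) == "section"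

-- Loop state = (sections, section); `sections[section].append(clip)` is modify at index `section`.
-- `sections.append(sections[0]); del sections[0]`: sections is never empty (starts as [[]], only grows),
-- so sections[0] = headD [] is exact, and `del sections[0]` is `drop 1`.
def layout_to_sequences (layout : List (List (String × String))) (title_last : Bool) : List (List (List (String × String))) :=
  let st := layout.foldl
    (fun (st : List (List (List (String × String))) × Nat) clip =>
      if refSec7 clip then (st.1 ++ [[clip]], st.2 + 1)
      else (st.1.modify st.2 (fun s => s ++ [clip]), st.2))
    ([[]], 0)
  let sections := st.1
  if title_last then (sections ++ [sections.headD []]).drop 1 else sections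

-- ===== PORT B =====
def layout_to_sequences_alt (layout : List (List (String × String))) (title_last : Bool) : List (List (List (String × String))) :=
  let marks : List Int := ((PySem.List.enumerate layout 0).filter (fun p => refSec7 p.2)).map (·.1)
  let bounds : List Int := [0] ++ marks ++ [(layout.length : Int)]
  let sections := (bounds.zip (PySem.List.slice bounds (some 1) none)).map
    (fun ab => PySem.List.slice layout (some ab.1) (some ab.2))
  if title_last then PySem.List.slice sections (some 1) none ++ PySem.List.slice sections none (some 1)
  else sections

-- ===== PRECONDITION & SPEC =====
-- Pre_ excludes exactly the layouts containing a clip without a "ref" key, on which Python A raises KeyError.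
def Pre_layout_to_sequences (layout : List (List (String × String))) (title_last : Bool) : Prop :=
  ∀ clip ∈ layout, (clip.find? (fun kv => kv.1 == "ref")).isSome = true
instance (layout : List (List (String × String))) (title_last : Bool) : Decidable (Pre_layout_to_sequences layout title_last) := by unfold Pre_layout_to_sequences; infer_instance

def pvWitness_layout_to_sequences : (List (List (String × String))) × Bool :=
  ([[("ref", "title")], [("ref", "section1")], [("ref", "clip1")]], true)

def Spec_layout_to_sequences (layout : List (List (String × String))) (title_last : Bool) (out : List (List (List (String × String)))) : Prop := out = layout_to_sequences_alt layout title_last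
instance (layout : List (List (String × String))) (title_last : Bool) (out : List (List (List (String × String)))) : Decidable (Spec_layout_to_sequences layout title_last out) := by unfold Spec_layout_to_sequences; infer_instance

-- ===== CLAIM (what is proved, stated in full; the proofs are below) =====
def Claim_equal_layout_to_sequences : Prop := ∀ (layout : List (List (String × String))) (title_last : Bool), Dom_layout_to_sequences layout title_last → Pre_layout_to_sequences layout title_last → Spec_layout_to_sequences layout title_last (layout_to_sequences layout title_last)

-- ===== LEMMAS AND PROOFS =====

-- The common mathematical shape of the grouping: split at section clips, front to back.
def secSplit (pre : List (List (String × String))) : List (List (String × String)) → List (List (List (String × String)))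
  | [] => [pre]
  | c :: rest => if refSec7 c then pre :: secSplit [c] rest else secSplit (pre ++ [c]) rest

def mapHead {α : Type} (f : α → α) : List α → List α
  | [] => []
  | h :: t => f h :: t

def marksI (s : Int) : List (List (String × String)) → List Int
  | [] => []
  | c :: xs => if refSec7 c then s :: marksI (s + 1) xs else marksI (s + 1) xs

def sliceBy (xs : List (List (String × String))) (bs : List Int) : List (List (List (String × String))) :=
  (bs.zip bs.tail).map (fun ab => PySem.List.slice xs (some ab.1) (some ab.2))

theorem mapHead_mapHead {α : Type} (f g : α → α) (l : List α) :
    mapHead f (mapHead g l) = mapHead (fun x => f (g x)) l := by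
  cases l <;> simp [mapHead]

theorem secSplit_pre (xs : List (List (String × String))) :
    ∀ pre, secSplit pre xs = mapHead (fun s => pre ++ s) (secSplit [] xs) := by
  induction xs with
  | nil => intro pre; simp [secSplit, mapHead]
  | cons c xs ih =>
    intro pre
    by_cases h : refSec7 c
    · simp [secSplit, h, mapHead]
    · rw [show secSplit pre (c :: xs) = secSplit (pre ++ [c]) xs from by simp [secSplit, h],
          show secSplit [] (c :: xs) = secSplit ([] ++ [c]) xs from by simp [secSplit, h]]
      rw [ih (pre ++ [c]), ih ([] ++ [c]), mapHead_mapHead]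
      cases secSplit [] xs <;> simp [mapHead]

theorem marks_enum (xs : List (List (String × String))) :
    ∀ s, ((PySem.List.enumerate xs s).filter (fun p => refSec7 p.2)).map (·.1) = marksI s xs := by
  induction xs with
  | nil => intro s; simp [PySem.List.enumerate_nil, marksI]
  | cons c xs ih =>
    intro s
    by_cases h : refSec7 c <;>
      simp [PySem.List.enumerate_cons, h, marksI, ih]

theorem marksI_shift (xs : List (List (String × String))) :
    ∀ s t, marksI (s + t) xs = (marksI s xs).map (· + t) := by
  induction xs with
  | nil => intro s t; simp [marksI]
  | cons c xs ih =>
    intro s t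
    by_cases h : refSec7 c <;>
      simp [marksI, h, ← ih, add_right_comm]

theorem marksI_nonneg (xs : List (List (String × String))) :
    ∀ s, 0 ≤ s → ∀ b ∈ marksI s xs, 0 ≤ b := by
  induction xs with
  | nil => intro s _ b hb; simp [marksI] at hb
  | cons c xs ih =>
    intro s hs b hb
    by_cases h : refSec7 c
    · simp [marksI, h] at hb
      rcases hb with hb | hb
      · omega
      · exact ih (s + 1) (by omega) b hb
    · simp [marksI, h] at hb
      exact ih (s + 1) (by omega) b hb

theorem slice_shift (c : List (String × String)) (xs : List (List (String × String))) (a b : Int)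
    (ha : 0 ≤ a) (hb : 0 ≤ b) :
    PySem.List.slice (c :: xs) (some (a + 1)) (some (b + 1)) = PySem.List.slice xs (some a) (some b) := by
  rw [PySem.List.slice_toNat (c :: xs) (by omega) (by omega), PySem.List.slice_toNat xs ha hb]
  have h1 : (a + 1).toNat = a.toNat + 1 := by omega
  have h2 : (b + 1).toNat - (a + 1).toNat = b.toNat - a.toNat := by omega
  rw [h2, h1, List.drop_succ_cons]

theorem slice_zero_cons (c : List (String × String)) (xs : List (List (String × String))) (b : Int)
    (hb : 0 ≤ b) :
    PySem.List.slice (c :: xs) (some 0) (some (b + 1)) = c :: PySem.List.slice xs (some 0) (some b) := by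
  rw [PySem.List.slice_toNat (c :: xs) (by omega) (by omega), PySem.List.slice_toNat xs (by omega) hb]
  have h1 : (b + 1).toNat = b.toNat + 1 := by omega
  simp [h1]

theorem sliceBy_shift (c : List (String × String)) (xs : List (List (String × String))) :
    ∀ bs : List Int, (∀ b ∈ bs, 0 ≤ b) →
      sliceBy (c :: xs) (bs.map (· + 1)) = sliceBy xs bs := by
  intro bs
  induction bs with
  | nil => intro _; simp [sliceBy]
  | cons b rest ih =>
    intro hnn
    cases rest with
    | nil => simp [sliceBy]
    | cons b2 r =>
      have hb : 0 ≤ b := hnn b (by simp)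
      have hb2 : 0 ≤ b2 := hnn b2 (by simp)
      have ih' := ih (fun x hx => hnn x (List.mem_cons_of_mem _ hx))
      simp only [List.map_cons, sliceBy, List.zip_cons_cons, List.tail_cons, List.map_cons] at *
      rw [slice_shift c xs b b2 hb hb2]
      exact congrArg _ ih'

theorem sliceBy_zero_shift (c : List (String × String)) (xs : List (List (String × String)))
    (T : List Int) (hnn : ∀ b ∈ T, 0 ≤ b) (hne : T ≠ []) :
    sliceBy (c :: xs) ((0 : Int) :: T.map (· + 1)) = mapHead (fun s => c :: s) (sliceBy xs ((0 : Int) :: T)) := by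
  cases T with
  | nil => exact absurd rfl hne
  | cons t0 R =>
    have ht0 : 0 ≤ t0 := hnn t0 (by simp)
    have h1 := slice_zero_cons c xs t0 ht0
    have h2 := sliceBy_shift c xs (t0 :: R) hnn
    simp only [sliceBy, List.map_cons, List.zip_cons_cons, List.tail_cons, mapHead] at h2 ⊢
    rw [h1, h2]

theorem slices_eq_secSplit (xs : List (List (String × String))) :
    sliceBy xs ((0 : Int) :: (marksI 0 xs ++ [(xs.length : Int)])) = secSplit [] xs := by
  induction xs with
  | nil => simp [sliceBy, marksI, secSplit, PySem.List.slice_toNat [] le_rfl le_rfl]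
  | cons c xs ih =>
    have hT : ∀ b ∈ marksI 0 xs ++ [(xs.length : Int)], 0 ≤ b := by
      intro b hb
      rcases List.mem_append.mp hb with hb | hb
      · exact marksI_nonneg xs 0 le_rfl b hb
      · simp at hb; omega
    have hTne : marksI 0 xs ++ [(xs.length : Int)] ≠ [] := by simp
    have hs := marksI_shift xs 0 1
    simp only [zero_add] at hs
    have hmap : (marksI 0 xs ++ [(xs.length : Int)]).map (· + 1) =
        marksI 1 xs ++ [(((c :: xs).length : Nat) : Int)] := by
      simp only [List.map_append, List.map_cons, List.map_nil, ← hs, List.length_cons]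
      push_cast
      ring_nf
    have step2 : sliceBy (c :: xs) ((0 : Int) :: (marksI 1 xs ++ [(((c :: xs).length : Nat) : Int)])) =
        mapHead (fun s => c :: s) (sliceBy xs ((0 : Int) :: (marksI 0 xs ++ [(xs.length : Int)]))) := by
      rw [← hmap]
      exact sliceBy_zero_shift c xs _ hT hTne
    by_cases h : refSec7 c
    · have hm : marksI 0 (c :: xs) = 0 :: marksI 1 xs := by simp [marksI, h]
      rw [hm]
      have hempty : PySem.List.slice (c :: xs) (some (0 : Int)) (some (0 : Int)) = [] := by
        rw [PySem.List.slice_toNat (c :: xs) le_rfl le_rfl]; simp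
      have step1 : sliceBy (c :: xs) ((0 : Int) :: (0 :: marksI 1 xs ++ [(((c :: xs).length : Nat) : Int)])) =
          PySem.List.slice (c :: xs) (some (0 : Int)) (some (0 : Int)) ::
          sliceBy (c :: xs) ((0 : Int) :: (marksI 1 xs ++ [(((c :: xs).length : Nat) : Int)])) := by
        simp [sliceBy]
      rw [step1, hempty, step2, ih]
      rw [show secSplit [] (c :: xs) = [] :: secSplit [c] xs from by simp [secSplit, h]]
      rw [show secSplit [c] xs = secSplit ([] ++ [c]) xs from by simp, secSplit_pre xs ([] ++ [c])]
      cases secSplit [] xs <;> simp [mapHead]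
    · have hm : marksI 0 (c :: xs) = marksI 1 xs := by simp [marksI, h]
      rw [hm, step2, ih]
      rw [show secSplit [] (c :: xs) = secSplit ([] ++ [c]) xs from by simp [secSplit, h]]
      rw [secSplit_pre xs ([] ++ [c])]
      cases secSplit [] xs <;> simp [mapHead]

theorem modify_append_last (ps : List (List (List (String × String)))) (pre : List (List (String × String)))
    (f : List (List (String × String)) → List (List (String × String))) :
    (ps ++ [pre]).modify ps.length f = ps ++ [f pre] := by
  rw [List.modify_eq_set_getElem?]
  simp

theorem foldA (xs : List (List (String × String))) :
    ∀ ps pre, (xs.foldl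
      (fun (st : List (List (List (String × String))) × Nat) clip =>
        if refSec7 clip then (st.1 ++ [[clip]], st.2 + 1)
        else (st.1.modify st.2 (fun s => s ++ [clip]), st.2))
      (ps ++ [pre], ps.length)).1 = ps ++ secSplit pre xs := by
  induction xs with
  | nil => intro ps pre; simp [secSplit]
  | cons c xs ih =>
    intro ps pre
    rw [List.foldl_cons]
    by_cases h : refSec7 c
    · rw [if_pos h]
      have harg : (ps ++ [pre] ++ [[c]], ps.length + 1) = ((ps ++ [pre]) ++ [[c]], (ps ++ [pre]).length) := by
        simp
      rw [harg, ih (ps ++ [pre]) [c]]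
      simp [secSplit, h]
    · rw [if_neg h, modify_append_last, ih ps (pre ++ [c])]
      simp [secSplit, h]

theorem rot_eq (S : List (List (List (String × String)))) :
    (S ++ [S.headD []]).drop 1 = PySem.List.slice S (some 1) none ++ PySem.List.slice S none (some 1) := by
  cases S with
  | nil => simp [PySem.List.slice]
  | cons h t => simp [PySem.List.slice]

theorem core_eq (layout : List (List (String × String))) :
    (layout.foldl
      (fun (st : List (List (List (String × String))) × Nat) clip =>
        if refSec7 clip then (st.1 ++ [[clip]], st.2 + 1)
        else (st.1.modify st.2 (fun s => s ++ [clip]), st.2))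
      ([[]], 0)).1 =
    ((([(0 : Int)] ++ ((PySem.List.enumerate layout 0).filter (fun p => refSec7 p.2)).map (fun x => x.1) ++ [(layout.length : Int)]).zip
        (PySem.List.slice ([(0 : Int)] ++ ((PySem.List.enumerate layout 0).filter (fun p => refSec7 p.2)).map (fun x => x.1) ++ [(layout.length : Int)]) (some 1) none)).map
      (fun ab => PySem.List.slice layout (some ab.1) (some ab.2))) := by
  have hA := foldA layout [] []
  simp only [List.nil_append, List.length_nil] at hA
  rw [hA]
  have hB : ([(0 : Int)] ++ ((PySem.List.enumerate layout 0).filter (fun p => refSec7 p.2)).map (fun x => x.1) ++ [(layout.length : Int)]) =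
      (0 : Int) :: (marksI 0 layout ++ [(layout.length : Int)]) := by
    rw [show (((PySem.List.enumerate layout 0).filter (fun p => refSec7 p.2)).map (fun x => x.1)) = marksI 0 layout from marks_enum layout 0]
    simp
  rw [hB, PySem.List.slice_from_one]
  exact (slices_eq_secSplit layout).symm

-- ===== VERDICT (by name: the statement is the Claim_ definition above) =====
theorem layout_to_sequences_spec : Claim_equal_layout_to_sequences := by
  intro layout title_last _ _
  unfold Spec_layout_to_sequences layout_to_sequences layout_to_sequences_alt
  simp only []
  rw [core_eq layout]
  cases title_last
  · rfl
  · exact rot_eq _
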